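-- pv_equiv track=rewrite | github.com/sujan-sube/Project-Euler-Exercises | ProjectEulerA.py | findLargestAdjacentProduct
-- ===== SOURCE A (Python) =====
-- def findLargestAdjacentProduct(numArr, subset):
--   numSets = len(numArr) - subset + 1
--   productList = []
--   for i in range(numSets):
--     product = 1
--     for j in numArr[i:i + subset]:
--       product *= int(j)
--     productList.append(product)
--   return max(productList)
-- ===== SOURCE B (Python) =====
-- def findLargestAdjacentProduct(numArr, subset):
--     # O(n) sliding window: maintain product of nonzero entries and a zero count.
--     if subset <= 0:
--         return 1
--     n = len(numArr)
--     zeros = 0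
--     prod = 1
--     best = None
--     for i in range(n):
--         x = numArr[i]
--         if x == 0:
--             zeros += 1
--         else:
--             prod *= x
--         if i >= subset:
--             y = numArr[i - subset]
--             if y == 0:
--                 zeros -= 1
--             else:
--                 prod //= y
--         if i >= subset - 1:
--             cand = 0 if zeros > 0 else prod
--             if best is None or cand > best:
--                 best = cand
--     return best
-- ===== Notes on version B (the rewrite author's own statement) =====
-- stated objective: faster
-- what changed: A recomputes each window's product from scratch (and stores all of them before taking max); B makes one sliding-window pass keeping the product of the window's nonzero entries, a zero count, and a running maximum.
-- outside the precondition, e.g. on findLargestAdjacentProduct([-3, -4, 2, 1, -3], -1): A returns 24, B returns 1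
import Mathlib
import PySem

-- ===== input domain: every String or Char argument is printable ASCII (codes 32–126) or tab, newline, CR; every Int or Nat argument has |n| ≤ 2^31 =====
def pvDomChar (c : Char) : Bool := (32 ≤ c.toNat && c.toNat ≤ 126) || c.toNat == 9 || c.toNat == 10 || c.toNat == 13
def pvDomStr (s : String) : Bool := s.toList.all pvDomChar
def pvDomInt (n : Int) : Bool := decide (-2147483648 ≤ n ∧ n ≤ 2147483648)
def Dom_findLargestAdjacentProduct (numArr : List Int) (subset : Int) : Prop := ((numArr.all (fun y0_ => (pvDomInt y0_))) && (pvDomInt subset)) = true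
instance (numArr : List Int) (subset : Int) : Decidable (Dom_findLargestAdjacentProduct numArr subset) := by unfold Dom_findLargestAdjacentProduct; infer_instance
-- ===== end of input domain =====

-- B replaces A's per-window product recomputation (O(n·subset)) by one sliding-window pass that
-- maintains the product of the window's nonzero entries plus a zero count (O(n)).

-- ===== PORT A =====
def findLargestAdjacentProduct (numArr : List Int) (subset : Int) : Int :=
  let numSets : Int := (numArr.length : Int) - subset + 1
  let productList : List Int :=
    (PySem.List.pyRange 0 numSets 1).foldl
      (fun pl i =>
        pl ++ [(PySem.List.slice numArr (some i) (some (i + subset))).foldl (fun p j => p * j) 1])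
      []
  (PySem.List.max? productList (fun x => x)).getD 0   -- max([]) raises: excluded by Pre_

-- ===== PORT B =====
-- loop body of Source B's single for-loop (state = (zeros, prod, best))
def altStep (numArr : List Int) (subset : Int) (st : Int × Int × Option Int) (i : Int) :
    Int × Int × Option Int :=
  let x := PySem.List.pyGetD numArr i 0
  let zeros := if x = 0 then st.1 + 1 else st.1
  let prod := if x = 0 then st.2.1 else st.2.1 * x
  let zp : Int × Int :=
    if subset ≤ i then
      let y := PySem.List.pyGetD numArr (i - subset) 0
      if y = 0 then (zeros - 1, prod) else (zeros, PySem.Int.floordiv prod y)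
    else (zeros, prod)
  let best :=
    if subset - 1 ≤ i then
      let cand := if 0 < zp.1 then 0 else zp.2
      match st.2.2 with
      | none => some cand
      | some b => some (if b < cand then cand else b)
    else st.2.2
  (zp.1, zp.2, best)

def findLargestAdjacentProduct_alt (numArr : List Int) (subset : Int) : Int :=
  if subset ≤ 0 then 1
  else
    let n : Int := (numArr.length : Int)
    let st := (PySem.List.pyRange 0 n 1).foldl (altStep numArr subset) (0, 1, none)
    st.2.2.getD 0   -- best is still None only outside Pre_

-- ===== PRECONDITION & SPEC =====
-- Pre_ excludes (a) subset > len(numArr), where A raises ValueError on max([]), and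
-- (b) subset < 0, outside the natural domain of a window size, where A's value is an
-- artefact of Python's negative-index slicing in numArr[i:i+subset].
def Pre_findLargestAdjacentProduct (numArr : List Int) (subset : Int) : Prop :=
  0 ≤ subset ∧ subset ≤ (numArr.length : Int)
instance (numArr : List Int) (subset : Int) : Decidable (Pre_findLargestAdjacentProduct numArr subset) := by unfold Pre_findLargestAdjacentProduct; infer_instance
def pvWitness_findLargestAdjacentProduct : List Int × Int := ([2, 3, -4, 5], 2)
def Spec_findLargestAdjacentProduct (numArr : List Int) (subset : Int) (out : Int) : Prop := out = findLargestAdjacentProduct_alt numArr subset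
instance (numArr : List Int) (subset : Int) (out : Int) : Decidable (Spec_findLargestAdjacentProduct numArr subset out) := by unfold Spec_findLargestAdjacentProduct; infer_instance

-- ===== CLAIM (what is proved, stated in full; the proofs are below) =====
def Claim_equal_findLargestAdjacentProduct : Prop := ∀ (numArr : List Int) (subset : Int), Dom_findLargestAdjacentProduct numArr subset → Pre_findLargestAdjacentProduct numArr subset → Spec_findLargestAdjacentProduct numArr subset (findLargestAdjacentProduct numArr subset)

-- ===== LEMMAS AND PROOFS =====

-- product of the window of length s starting at index k
def wpr (numArr : List Int) (s k : Nat) : Int := ((numArr.drop k).take s).prod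

-- running maximum of the first (m - s + 1) window products, written as B's loop leaves it
def bval (numArr : List Int) (s m : Nat) : Int :=
  (List.range (m - s)).foldl (fun a k => max a (wpr numArr s (k + 1))) (wpr numArr s 0)

-- the window B's state describes after m iterations
def win (numArr : List Int) (s m : Nat) : List Int := (numArr.take m).drop (m - s)

lemma cand_eq (l : List Int) :
    (if (0:Int) < ((l.count 0 : Nat) : Int) then 0 else (l.filter (fun z => z ≠ 0)).prod) = l.prod := by
  by_cases h : l.count 0 = 0
  · have hz : ∀ x ∈ l, ¬ x = 0 := by
      intro x hx hx0
      subst hx0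
      exact absurd h (List.count_pos_iff.mpr hx).ne'
    rw [if_neg (by simp [h]), List.filter_eq_self.mpr (by intro a ha; simpa using hz a ha)]
  · have : (0:Int) ∈ l := by
      by_contra hc
      exact h (by simpa using List.count_eq_zero.mpr hc)
    rw [if_pos (by omega), Eq.symm (List.prod_eq_zero this)]

lemma max_if (b c : Int) : (if b < c then c else b) = max b c := by
  split_ifs <;> omega

-- B's loop invariant
lemma zeros_snoc (l : List Int) (x : Int) :
    (if x = 0 then ((l.count 0 : Nat) : Int) + 1 else ((l.count 0 : Nat) : Int))
      = (((l ++ [x]).count 0 : Nat) : Int) := by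
  by_cases hx : x = 0
  · simp [List.count_append, hx]
  · simp [List.count_append, hx]

lemma prodnz_snoc (l : List Int) (x : Int) :
    (if x = 0 then (l.filter (fun z => z ≠ 0)).prod else (l.filter (fun z => z ≠ 0)).prod * x)
      = ((l ++ [x]).filter (fun z => z ≠ 0)).prod := by
  by_cases hx : x = 0 <;> simp [List.filter_append, hx]

-- one full sliding step on the state (add x at the right, drop y at the left)
lemma slide_key (t : List Int) (y x : Int) :
    (if y = 0
       then ((if x = 0 then (((y :: t).count 0 : Nat) : Int) + 1 else (((y :: t).count 0 : Nat) : Int)) - 1,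
             (if x = 0 then ((y :: t).filter (fun z => z ≠ 0)).prod
              else ((y :: t).filter (fun z => z ≠ 0)).prod * x))
       else ((if x = 0 then (((y :: t).count 0 : Nat) : Int) + 1 else (((y :: t).count 0 : Nat) : Int)),
             PySem.Int.floordiv
               (if x = 0 then ((y :: t).filter (fun z => z ≠ 0)).prod
                else ((y :: t).filter (fun z => z ≠ 0)).prod * x) y))
    = ((((t ++ [x]).count 0 : Nat) : Int), ((t ++ [x]).filter (fun z => z ≠ 0)).prod) := by
  by_cases hy : y = 0 <;> by_cases hx : x = 0 <;>
    refine Prod.ext ?_ ?_ <;>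
    simp [hy, hx, List.count_append, List.filter_append, PySem.Int.floordiv]
  · rw [mul_assoc]
    exact Int.mul_fdiv_cancel_left _ hy

-- B's loop invariant
lemma altLoop_inv (numArr : List Int) (s : Nat) (hs : 1 ≤ s) :
    ∀ m, m ≤ numArr.length →
    (List.range m).foldl (fun (st : Int × Int × Option Int) (k : Nat) => altStep numArr (s : Int) st (k : Int)) (0, 1, none)
      = ((((win numArr s m).count 0 : Nat) : Int),
         ((win numArr s m).filter (fun z => z ≠ 0)).prod,
         if m < s then none else some (bval numArr s m)) := by
  intro m
  induction m with
  | zero =>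
      intro _
      simp [win, show 0 < s by omega]
  | succ m ih =>
      intro hm
      have hml : m < numArr.length := by omega
      rw [List.range_succ, List.foldl_append, ih (by omega)]
      simp only [List.foldl_cons, List.foldl_nil]
      have hx : PySem.List.pyGetD numArr ((m : Nat) : Int) 0 = numArr[m] := by
        rw [PySem.List.pyGetD_natCast]
        exact List.getD_eq_getElem _ _ hml
      have htake : numArr.take (m + 1) = numArr.take m ++ [numArr[m]] :=
        (List.take_concat_get' numArr m hml).symm
      rcases lt_trichotomy (m + 1) s with hms | hms | hms
      · -- growing window, no candidate yet
        have h1 : ¬ ((s : Int) ≤ (m : Int)) := by omega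
        have h2 : ¬ ((s : Int) - 1 ≤ (m : Int)) := by omega
        have hwm : win numArr s m = numArr.take m := by
          unfold win; rw [Nat.sub_eq_zero_of_le (by omega), List.drop_zero]
        have hwm1 : win numArr s (m + 1) = numArr.take m ++ [numArr[m]] := by
          unfold win; rw [Nat.sub_eq_zero_of_le (by omega), List.drop_zero, htake]
        simp only [altStep, hx, if_neg h1, if_neg h2, hwm, hwm1]
        refine Prod.ext ?_ (Prod.ext ?_ ?_)
        · exact zeros_snoc _ _
        · exact prodnz_snoc _ _
        · rw [if_pos (show m < s by omega), if_pos hms]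
      · -- the window becomes complete for the first time
        have h1 : ¬ ((s : Int) ≤ (m : Int)) := by omega
        have h2 : (s : Int) - 1 ≤ (m : Int) := by omega
        have hwm : win numArr s m = numArr.take m := by
          unfold win; rw [Nat.sub_eq_zero_of_le (by omega), List.drop_zero]
        have hwm1 : win numArr s (m + 1) = numArr.take m ++ [numArr[m]] := by
          unfold win; rw [Nat.sub_eq_zero_of_le (by omega), List.drop_zero, htake]
        have hb : bval numArr s (m + 1) = (win numArr s (m + 1)).prod := by
          unfold bval wpr
          rw [Nat.sub_eq_zero_of_le (by omega), hwm1, ← htake, ← hms]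
          simp
        simp only [altStep, hx, if_neg h1, if_pos h2, hwm, hwm1]
        refine Prod.ext ?_ (Prod.ext ?_ ?_)
        · exact zeros_snoc _ _
        · exact prodnz_snoc _ _
        · rw [if_pos (show m < s by omega), if_neg (show ¬ m + 1 < s by omega),
              hb, hwm1, zeros_snoc, prodnz_snoc, cand_eq]
      · -- full sliding step: add numArr[m] at the right, drop numArr[m - s] at the left
        have hsm : s ≤ m := by omega
        have h1 : (s : Int) ≤ (m : Int) := by omega
        have h2 : (s : Int) - 1 ≤ (m : Int) := by omega
        have h3 : (m : Int) - (s : Int) = ((m - s : Nat) : Int) := by omega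
        have hy : PySem.List.pyGetD numArr (((m - s : Nat)) : Int) 0 = numArr[m - s] := by
          rw [PySem.List.pyGetD_natCast]
          exact List.getD_eq_getElem _ _ (by omega)
        have hllen : (numArr.take m).length = m := by rw [List.length_take]; omega
        have hwold : win numArr s m = numArr[m - s] :: (numArr.take m).drop (m - s + 1) := by
          unfold win
          rw [List.drop_eq_getElem_cons (by rw [hllen]; omega)]
          congr 1
          exact List.getElem_take
        have hwnew : win numArr s (m + 1) = (numArr.take m).drop (m - s + 1) ++ [numArr[m]] := by
          unfold win
          rw [htake, show m + 1 - s = m - s + 1 by omega,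
              List.drop_append_of_le_length (by rw [hllen]; omega)]
        have hwprod : wpr numArr s (m - s + 1) = (win numArr s (m + 1)).prod := by
          unfold wpr win
          rw [List.drop_take, show m + 1 - s = m - s + 1 by omega,
              show m + 1 - (m - s + 1) = s by omega]
        have hbval : bval numArr s (m + 1) = max (bval numArr s m) (win numArr s (m + 1)).prod := by
          unfold bval
          rw [show m + 1 - s = (m - s) + 1 by omega, List.range_succ, List.foldl_append]
          simp only [List.foldl_cons, List.foldl_nil]
          rw [hwprod]
        simp only [altStep, hx, h3, hy, if_pos h1, if_pos h2, hwold, hwnew,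
                   if_neg (show ¬ m < s by omega), if_neg (show ¬ m + 1 < s by omega)]
        rw [slide_key]
        refine Prod.ext rfl (Prod.ext rfl ?_)
        simp only [cand_eq]
        rw [max_if, hbval, hwnew]

lemma a_list_eq (numArr : List Int) (s : Nat) :
    (PySem.List.pyRange 0 ((numArr.length : Int) - (s : Int) + 1) 1).foldl
      (fun pl i => pl ++ [(PySem.List.slice numArr (some i) (some (i + (s : Int)))).foldl (fun p j => p * j) 1]) []
    = (List.range (((numArr.length : Int) - (s : Int) + 1).toNat)).map (fun k => wpr numArr s k) := by
  rw [PySem.List.pyRange_one, List.foldl_map, PySem.List.foldl_append_singleton_eq_map,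
      List.nil_append, Int.sub_zero]
  refine List.map_congr_left ?_
  intro k _
  rw [zero_add, show (k : Int) + (s : Int) = ((k + s : Nat) : Int) by push_cast; ring,
      PySem.List.slice_natCast, Nat.add_sub_cancel_left]
  exact (List.prod_eq_foldl).symm

-- the maximum of (m+1) window products is B's running maximum
lemma max_map_eq (f : Nat → Int) (m : Nat) :
    PySem.List.max? ((List.range (m + 1)).map f) (fun x => x)
      = some ((List.range m).foldl (fun a k => max a (f (k + 1))) (f 0)) := by
  rw [List.range_succ_eq_map, List.map_cons, PySem.List.max?_id_cons, List.map_map, List.foldl_map]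
  rfl

lemma foldl_max_one (l : List Nat) : l.foldl (fun a _ => max a (1 : Int)) 1 = 1 := by
  induction l with
  | nil => rfl
  | cons a t ih => simpa using ih

-- ===== VERDICT (by name: the statement is the Claim_ definition above) =====
theorem findLargestAdjacentProduct_spec : Claim_equal_findLargestAdjacentProduct := by
  intro numArr subset _ hpre
  obtain ⟨h0, hle⟩ := hpre
  obtain ⟨s, rfl⟩ : ∃ s : Nat, subset = (s : Int) := ⟨subset.toNat, by omega⟩
  unfold Spec_findLargestAdjacentProduct findLargestAdjacentProduct findLargestAdjacentProduct_alt
  dsimp only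
  by_cases hz : s = 0
  · -- subset = 0: every window is empty, both sides give 1
    subst hz
    rw [if_pos (by norm_num), a_list_eq numArr 0,
        show ((numArr.length : Int) - ((0 : Nat) : Int) + 1).toNat = numArr.length + 1 by omega,
        max_map_eq]
    simp [wpr, foldl_max_one]
  · have hs : 1 ≤ s := by omega
    have hslen : s ≤ numArr.length := by exact_mod_cast hle
    rw [a_list_eq numArr s,
        show ((numArr.length : Int) - (s : Int) + 1).toNat = (numArr.length - s) + 1 by omega,
        max_map_eq]
    rw [if_neg (by omega), PySem.List.pyRange_one, List.foldl_map, Int.sub_zero,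
        Int.toNat_natCast]
    simp only [zero_add]
    rw [altLoop_inv numArr s hs numArr.length le_rfl,
        if_neg (show ¬ numArr.length < s by omega)]
    rfl
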